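-- pv_equiv track=rewrite | github.com/nasrixz/scamlens | dns_server/typosquat.py | _contains_at_boundary
-- ===== SOURCE A (Python) =====
-- def _contains_at_boundary(label: str, brand: str) -> bool:
--     """True when `brand` appears in `label` as its own token — at the start,
--     end, or separated by '-' or '_'. Avoids 'apple' ⊂ 'snapple' false hits."""
--     if label == brand:
--         return False
--     idx = 0
--     while True:
--         i = label.find(brand, idx)
--         if i == -1:
--             return False
--         left_ok = i == 0 or label[i - 1] in "-_"
--         end = i + len(brand)
--         right_ok = end == len(label) or label[end] in "-_"
--         if left_ok and right_ok:
--             return True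
--         idx = i + 1
-- ===== SOURCE B (Python) =====
-- def _contains_at_boundary(label: str, brand: str) -> bool:
--     """True when `brand` appears in `label` as its own token — at the start,
--     end, or separated by '-' or '_'. Avoids 'apple' ⊂ 'snapple' false hits."""
--     if label == brand:
--         return False
--     n, m = len(label), len(brand)
--     return any(
--         label[i:i + m] == brand
--         and (i == 0 or label[i - 1] in "-_")
--         and (i + m == n or label[i + m] in "-_")
--         for i in range(n - m + 1)
--     )
-- ===== Notes on version B (the rewrite author's own statement) =====
-- stated objective: simpler
-- what changed: Replaced the stateful while-loop that repeatedly calls str.find with an advancing cursor and early returns by a single any() comprehension that exhaustively tests every cut position for a delimited occurrence of brand.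
import Mathlib
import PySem

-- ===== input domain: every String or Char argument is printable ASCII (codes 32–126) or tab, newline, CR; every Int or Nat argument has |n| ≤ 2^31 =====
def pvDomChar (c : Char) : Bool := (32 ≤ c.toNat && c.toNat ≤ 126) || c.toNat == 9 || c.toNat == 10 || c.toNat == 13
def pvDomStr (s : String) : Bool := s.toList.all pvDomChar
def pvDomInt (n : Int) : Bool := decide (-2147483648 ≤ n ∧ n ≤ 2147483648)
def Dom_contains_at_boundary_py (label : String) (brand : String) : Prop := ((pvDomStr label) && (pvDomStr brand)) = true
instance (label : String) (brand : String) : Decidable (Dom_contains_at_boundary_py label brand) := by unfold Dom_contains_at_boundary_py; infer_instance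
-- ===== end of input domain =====

-- B replaces A's advancing str.find while-loop by one exhaustive any() over all cut
-- positions (objective: simpler); same return value on every input, no side effects.

-- c in "-_" for a single character c (exact: membership of a 1-char string in "-_")
def pvIsDelim (c : Char) : Bool := c == '-' || c == '_'

-- ===== PORT A =====
-- the `while True` loop of A; fuel = label.length + 2 always suffices (idx grows each round)
def pvLoopA (l b : List Char) (idx : Nat) (fuel : Nat) : Bool :=
  match fuel with
  | 0 => false
  | fuel + 1 =>
    let i := PySem.Chars.findFrom l b (idx : Int) none
    if i = -1 then false
    else
      let iN := i.toNat
      let left_ok := iN == 0 || pvIsDelim (l.getD (iN - 1) ' ')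
      let e := iN + b.length
      let right_ok := e == l.length || pvIsDelim (l.getD e ' ')
      if left_ok && right_ok then true else pvLoopA l b (iN + 1) fuel

def contains_at_boundary_py (label : String) (brand : String) : Bool :=
  if label == brand then false
  else pvLoopA label.toList brand.toList 0 (label.toList.length + 2)

-- ===== PORT B =====
-- the body of B's any(): label[i:i+m] == brand and boundary tests (slice ported as drop/take)
def pvCond (l b : List Char) (i : Nat) : Bool :=
  ((l.drop i).take b.length == b)
    && (i == 0 || pvIsDelim (l.getD (i - 1) ' '))
    && (i + b.length == l.length || pvIsDelim (l.getD (i + b.length) ' '))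

def contains_at_boundary_py_alt (label : String) (brand : String) : Bool :=
  if label == brand then false
  else
    let l := label.toList
    let b := brand.toList
    (List.range (l.length - b.length + 1)).any (fun i => pvCond l b i)

-- ===== PRECONDITION & SPEC =====
def Spec_contains_at_boundary_py (label : String) (brand : String) (out : Bool) : Prop := out = contains_at_boundary_py_alt label brand
instance (label : String) (brand : String) (out : Bool) : Decidable (Spec_contains_at_boundary_py label brand out) := by unfold Spec_contains_at_boundary_py; infer_instance

-- ===== CLAIM (what is proved, stated in full; the proofs are below) =====
def Claim_equal_contains_at_boundary_py : Prop := ∀ (label : String) (brand : String), Dom_contains_at_boundary_py label brand → Spec_contains_at_boundary_py label brand (contains_at_boundary_py label brand)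

-- ===== LEMMAS AND PROOFS =====

-- findFrom returns -1 once the start index is past the string
theorem pvFindFrom_past (l b : List Char) (k : Nat) (h : l.length < k) :
    PySem.Chars.findFrom l b (k : Int) none = -1 := by
  simp only [PySem.Chars.findFrom]
  have h0 : ¬ ((k : Int) < 0) := by omega
  rw [if_neg h0, if_pos (by exact_mod_cast h)]

-- pvCond implies an occurrence of b in l at i
theorem pvCond_prefix {l b : List Char} {i : Nat} (h : pvCond l b i = true) :
    b <+: l.drop i := by
  unfold pvCond at h
  simp only [Bool.and_eq_true, beq_iff_eq] at h
  obtain ⟨⟨htake, _⟩, _⟩ := h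
  exact htake ▸ List.take_prefix _ _

-- a delimited occurrence fits inside the label
theorem pvCond_le {l b : List Char} {i : Nat} (h : pvCond l b i = true) :
    i + b.length ≤ l.length := by
  unfold pvCond at h
  simp only [Bool.and_eq_true, Bool.or_eq_true, beq_iff_eq] at h
  obtain ⟨-, hr⟩ := h
  rcases hr with hr | hr
  · omega
  · by_contra hgt
    rw [List.getD_eq_default _ _ (by omega)] at hr
    simp [pvIsDelim] at hr

-- an occurrence at i ≥ idx is an infix of l.drop idx
theorem pvOcc_infix {l b : List Char} {idx i : Nat} (hle : idx ≤ i)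
    (h : b <+: l.drop i) : b <:+: l.drop idx := by
  have hd : l.drop i = (l.drop idx).drop (i - idx) := by
    rw [List.drop_drop]; congr 1; omega
  rw [hd] at h
  exact h.isInfix.trans (List.drop_suffix _ _).isInfix

-- at an occurrence position the match test of pvCond holds, leaving the boundary flags
theorem pvCond_of_prefix {l b : List Char} {i : Nat} (hp : b <+: l.drop i) :
    pvCond l b i = ((i == 0 || pvIsDelim (l.getD (i - 1) ' '))
      && (i + b.length == l.length || pvIsDelim (l.getD (i + b.length) ' '))) := by
  unfold pvCond
  have ht : (l.drop i).take b.length = b := (List.prefix_iff_eq_take.mp hp).symm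
  simp [ht]

-- loop characterization: A's loop from idx decides "some delimited occurrence at position ≥ idx"
theorem pvLoopA_eq (l b : List Char) :
    ∀ fuel idx, idx ≤ l.length + 1 → l.length + 2 ≤ fuel + idx →
    pvLoopA l b idx fuel = decide (∃ i < l.length + 1, idx ≤ i ∧ pvCond l b i = true) := by
  intro fuel
  induction fuel with
  | zero => intro idx h1 h2; omega
  | succ fuel ih =>
    intro idx h1 h2
    simp only [pvLoopA]
    rcases Nat.lt_or_ge l.length idx with hpast | hidx
    · -- idx = length + 1 : find gives -1, and no i ≤ length satisfies idx ≤ i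
      rw [pvFindFrom_past l b idx hpast, if_pos rfl]
      symm; simp only [decide_eq_false_iff_not]
      rintro ⟨i, hi0, hi1, _⟩; omega
    · -- idx ≤ length
      set iI := PySem.Chars.findFrom l b (idx : Int) none with hiI
      by_cases hf : iI = -1
      · rw [if_pos hf]
        have hno := (PySem.Chars.findFrom_natCast_eq_neg_one_iff l b idx hidx).mp hf
        symm; simp only [decide_eq_false_iff_not]
        rintro ⟨i, hi0, hi1, hc⟩
        exact hno (pvOcc_infix hi1 (pvCond_prefix hc))
      · rw [if_neg hf]
        obtain ⟨hge, hocc, hmin⟩ := PySem.Chars.findFrom_natCast_spec l b idx hidx hf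
        rw [← hiI] at hge hocc hmin
        set iN := iI.toNat with hiN
        have hgeN : idx ≤ iN := by omega
        have hiNle : iN ≤ l.length := by
          have h3 : iI = if PySem.Chars.find (List.drop idx l) b = -1
              then -1 else (idx : Int) + PySem.Chars.find (List.drop idx l) b := by
            rw [hiI]; exact PySem.Chars.findFrom_natCast l b idx hidx
          have h4 := PySem.Chars.find_le_length (List.drop idx l) b
          rw [List.length_drop] at h4
          by_cases hcase : PySem.Chars.find (List.drop idx l) b = -1
          · rw [h3, if_pos hcase] at hf; exact absurd rfl hf
          · rw [if_neg hcase] at h3; omega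
        have hcond := pvCond_of_prefix (l := l) (b := b) (i := iN) hocc
        by_cases hb : ((iN == 0 || pvIsDelim (l.getD (iN - 1) ' '))
            && (iN + b.length == l.length || pvIsDelim (l.getD (iN + b.length) ' '))) = true
        · -- boundaries hold at the found position: loop returns true, and iN is a witness
          rw [if_pos hb]
          symm; rw [decide_eq_true_eq]
          exact ⟨iN, by omega, hgeN, by rw [hcond]; exact hb⟩
        · -- boundaries fail: recurse from iN + 1
          rw [if_neg hb, ih (iN + 1) (by omega) (by omega)]
          congr 1
          apply propext
          constructor
          · rintro ⟨i, hi0, hi1, hc⟩; exact ⟨i, hi0, by omega, hc⟩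
          · rintro ⟨i, hi0, hi1, hc⟩
            refine ⟨i, hi0, ?_, hc⟩
            rcases Nat.lt_or_ge i (iN + 1) with hlt | hge1
            · rcases Nat.lt_or_ge i iN with hlt1 | hge2
              · exact absurd (pvCond_prefix hc) (hmin i hi1 hlt1)
              · have hEq : i = iN := by omega
                subst hEq
                rw [hcond] at hc
                exact absurd hc hb
            · exact hge1

-- B's any over range(n - m + 1) decides the same thing at idx = 0
theorem pvAlt_eq (l b : List Char) :
    (List.range (l.length - b.length + 1)).any (fun i => pvCond l b i)
      = decide (∃ i < l.length + 1, 0 ≤ i ∧ pvCond l b i = true) := by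
  rcases Bool.eq_false_or_eq_true
      ((List.range (l.length - b.length + 1)).any (fun i => pvCond l b i)) with h | h
  · rw [h]; symm
    rw [decide_eq_true_eq]
    rw [List.any_eq_true] at h
    obtain ⟨i, hmem, hc⟩ := h
    have hc1 : pvCond l b i = true := by simpa using hc
    exact ⟨i, by have := pvCond_le hc1; omega, Nat.zero_le _, hc1⟩
  · rw [h]; symm
    rw [decide_eq_false_iff_not]
    rintro ⟨i, hi0, -, hc⟩
    have hlt : i < l.length - b.length + 1 := by have := pvCond_le hc; omega
    rw [List.any_eq_false] at h
    exact absurd hc (by simpa using h i (List.mem_range.mpr hlt))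

-- ===== VERDICT (by name: the statement is the Claim_ definition above) =====
theorem contains_at_boundary_py_spec : Claim_equal_contains_at_boundary_py := by
  intro label brand _
  unfold Spec_contains_at_boundary_py
  simp only [contains_at_boundary_py, contains_at_boundary_py_alt]
  by_cases hg : (label == brand) = true
  · rw [if_pos hg, if_pos hg]
  · rw [if_neg hg, if_neg hg]
    rw [pvLoopA_eq label.toList brand.toList (label.toList.length + 2) 0 (by omega) (by omega)]
    rw [pvAlt_eq]
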